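-- pv_equiv track=rewrite | github.com/devanshu-cosmo/ml-projects | Hangman_Game/src/hangman/features/feature_extractor.py | _max_consecutive_blanks
-- ===== SOURCE A (Python) =====
-- def _max_consecutive_blanks(clean_word):
--     best = 0
--     cur = 0
--     for c in clean_word:
--         if c == "_":
--             cur += 1
--             best = max(best, cur)
--         else:
--             cur = 0
--     return best
-- ===== SOURCE B (Python) =====
-- def _max_consecutive_blanks(clean_word):
--     s = list(clean_word)
--     n = len(s)
--     best = 0
--     i = 0
--     while i < n:
--         if s[i] == "_":
--             j = i
--             while j < n and s[j] == "_":
--                 j += 1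
--             best = max(best, j - i)
--             i = j
--         else:
--             i += 1
--     return best
-- ===== Notes on version B (the rewrite author's own statement) =====
-- stated objective: alternative
-- what changed: Replaced the single pass that threads best/cur counters through every character by a run scanner: an outer loop finds the start of each underscore run, an inner loop jumps to its end, and best is updated once per run with the run length j-i.
import Mathlib
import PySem

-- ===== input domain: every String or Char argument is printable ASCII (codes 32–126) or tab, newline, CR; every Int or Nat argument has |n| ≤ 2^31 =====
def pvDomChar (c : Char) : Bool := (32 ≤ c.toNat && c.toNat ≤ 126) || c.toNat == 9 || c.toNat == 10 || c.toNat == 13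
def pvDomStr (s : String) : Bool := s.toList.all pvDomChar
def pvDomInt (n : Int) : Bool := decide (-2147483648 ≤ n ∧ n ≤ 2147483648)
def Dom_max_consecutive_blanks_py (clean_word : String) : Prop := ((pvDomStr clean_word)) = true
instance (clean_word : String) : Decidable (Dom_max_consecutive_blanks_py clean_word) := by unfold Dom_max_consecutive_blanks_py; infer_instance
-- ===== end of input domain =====

-- B replaces A's best/cur counter pass by a run scanner (outer loop per run, inner
-- loop measuring each underscore run); alternative decomposition, same O(n) cost.

-- ===== PORT A =====
-- A threads (best, cur) through every character.
def pvStepA (st : Int × Int) (c : Char) : Int × Int :=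
  if c = '_' then (max st.1 (st.2 + 1), st.2 + 1) else (st.1, 0)

def max_consecutive_blanks_py (clean_word : String) : Int :=
  (clean_word.toList.foldl pvStepA (0, 0)).1

-- ===== PORT B =====
-- Source B's outer while: at an underscore, the inner while advances j to the end of the
-- run (takeWhile/dropWhile render the j-scan), best is updated once with the run length.
def pvGoB : List Char → Int → Int
  | [], best => best
  | c :: rest, best =>
    if c = '_' then
      pvGoB (rest.dropWhile (· = '_')) (max best ((rest.takeWhile (· = '_')).length + 1))
    else
      pvGoB rest best
termination_by cs _ => cs.length
decreasing_by
  · simpa using Nat.lt_succ_of_le (rest.length_dropWhile_le (· = '_'))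
  · simp

def max_consecutive_blanks_py_alt (clean_word : String) : Int :=
  pvGoB clean_word.toList 0

-- ===== PRECONDITION & SPEC =====
def Spec_max_consecutive_blanks_py (clean_word : String) (out : Int) : Prop := out = max_consecutive_blanks_py_alt clean_word
instance (clean_word : String) (out : Int) : Decidable (Spec_max_consecutive_blanks_py clean_word out) := by unfold Spec_max_consecutive_blanks_py; infer_instance

-- ===== CLAIM (what is proved, stated in full; the proofs are below) =====
def Claim_equal_max_consecutive_blanks_py : Prop := ∀ (clean_word : String), Dom_max_consecutive_blanks_py clean_word → Spec_max_consecutive_blanks_py clean_word (max_consecutive_blanks_py clean_word)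

-- ===== LEMMAS AND PROOFS =====

-- Folding A's step over a run of k underscores, right after one '_' was consumed.
theorem pv_fold_run (k : Nat) (b c : Int) :
    (List.replicate k '_').foldl pvStepA (max b (c + 1), c + 1)
      = (max b (c + 1 + k), c + 1 + k) := by
  induction k generalizing c with
  | zero => simp
  | succ k ih =>
      rw [List.replicate_succ, List.foldl_cons,
        show pvStepA (max b (c + 1), c + 1) '_' = (max b (c + 1 + 1), c + 1 + 1) by
          simp [pvStepA],
        ih (c + 1)]
      rw [Prod.ext_iff]
      constructor <;> push_cast <;> omega

-- After a run, A's cur value is irrelevant when the next char (if any) is not '_'.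
theorem pv_fold_reset (r : List Char) (hr : ∀ d ∈ r.head?, d ≠ '_') (b c : Int) :
    (r.foldl pvStepA (b, c)).1 = (r.foldl pvStepA (b, 0)).1 := by
  cases r with
  | nil => rfl
  | cons d r' =>
      have hd : d ≠ '_' := hr d (by simp)
      simp [pvStepA, hd]

theorem pv_fold_eq_go (cs : List Char) (b : Int) :
    (cs.foldl pvStepA (b, 0)).1 = pvGoB cs b := by
  induction cs, b using pvGoB.induct with
  | case1 b => simp [pvGoB]
  | case2 rest b ih =>
      rw [pvGoB, if_pos rfl]
      set k := (rest.takeWhile (· = '_')).length with hk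
      have hsplit : rest = List.replicate k '_' ++ rest.dropWhile (· = '_') := by
        conv_lhs => rw [← rest.takeWhile_append_dropWhile (p := (· = '_'))]
        congr 1
        exact List.eq_replicate_of_mem (fun x hx => by
          simpa using List.mem_takeWhile_imp hx)
      have hhead : ∀ d ∈ (rest.dropWhile (· = '_')).head?, d ≠ '_' := by
        intro d hd h
        have h2 := List.head?_dropWhile_not (· = '_') rest
        rw [Option.mem_def] at hd
        rw [hd] at h2
        subst h
        simp at h2
      calc (('_' :: rest).foldl pvStepA (b, 0)).1
      _ = (rest.foldl pvStepA (max b (0 + 1), 0 + 1)).1 := by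
            simp [pvStepA]
      _ = ((rest.dropWhile (· = '_')).foldl pvStepA
            ((List.replicate k '_').foldl pvStepA (max b (0 + 1), 0 + 1))).1 := by
            rw [← List.foldl_append, ← hsplit]
      _ = pvGoB (rest.dropWhile (· = '_')) (max b (↑k + 1)) := by
            rw [pv_fold_run, pv_fold_reset _ hhead,
              show (0 : Int) + 1 + (k : Int) = (k : Int) + 1 by omega]
            exact ih
  | case3 c rest b hc ih =>
      rw [pvGoB, if_neg hc, List.foldl_cons]
      simp only [pvStepA, if_neg hc]
      exact ih

-- ===== VERDICT (by name: the statement is the Claim_ definition above) =====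
theorem max_consecutive_blanks_py_spec : Claim_equal_max_consecutive_blanks_py := by
  intro w _
  unfold Spec_max_consecutive_blanks_py max_consecutive_blanks_py max_consecutive_blanks_py_alt
  exact pv_fold_eq_go w.toList 0
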